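-- pv_equiv track=rewrite | github.com/Prasanthipandrada/codemind-python | Ascending_array.py | ase_ary
-- ===== SOURCE A (Python) =====
-- def ase_ary(l):
--     s=0
--     flag=0
--     for i in l:
--         if i>s:
--             s=i
--         else:
--             flag+=1
--     return flag
-- ===== SOURCE B (Python) =====
-- # Divide-and-conquer instead of a linear stateful scan: split the array in half,
-- # solve each half recursively, and pass max(bound, max(left)) as the right half's
-- # bound.  An element is counted when it does not exceed its incoming bound.
-- def ase_ary(l):
--     if not l:
--         return 0
--
--     def go(seg, bound):
--         if len(seg) == 1:
--             return 0 if seg[0] > bound else 1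
--         mid = len(seg) // 2
--         left = seg[:mid]
--         return go(left, bound) + go(seg[mid:], max(bound, max(left)))
--
--     return go(l, 0)
-- ===== Notes on version B (the rewrite author's own statement) =====
-- stated objective: alternative
-- what changed: Replaces A's single stateful running-maximum scan by a divide-and-conquer recursion: split the array in half, count in each half recursively, passing max(bound, max(left half)) as the right half's bound.
import Mathlib
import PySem

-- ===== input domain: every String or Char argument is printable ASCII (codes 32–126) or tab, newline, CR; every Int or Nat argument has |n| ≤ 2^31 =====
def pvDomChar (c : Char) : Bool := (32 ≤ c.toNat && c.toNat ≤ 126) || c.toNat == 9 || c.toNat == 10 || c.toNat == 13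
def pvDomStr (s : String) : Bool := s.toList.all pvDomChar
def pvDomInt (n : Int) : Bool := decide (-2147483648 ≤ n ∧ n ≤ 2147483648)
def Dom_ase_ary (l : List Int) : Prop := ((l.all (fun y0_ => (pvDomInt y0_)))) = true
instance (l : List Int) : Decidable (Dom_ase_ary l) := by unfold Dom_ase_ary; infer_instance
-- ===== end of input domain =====

-- B replaces A's stateful running-maximum loop by a divide-and-conquer recursion over halves; return values proved equal.
-- ===== PORT A =====
def ase_ary (l : List Int) : Int :=
  (l.foldl (fun (p : Int × Int) i => if i > p.1 then (i, p.2) else (p.1, p.2 + 1)) (0, 0)).2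

-- ===== PORT B =====
-- helper `go` of Source B; only ever applied to nonempty segments (the [] branch is unreachable)
def goAse (seg : List Int) (bound : Int) : Int :=
  match seg with
  | [] => 0
  | [x] => if x > bound then 0 else 1
  | x :: y :: rest =>
    let s := x :: y :: rest
    let mid := s.length / 2
    goAse (s.take mid) bound
      + goAse (s.drop mid) (max bound ((PySem.List.max? (s.take mid) (fun z => z)).getD 0))
termination_by seg.length
decreasing_by
  · simp only [List.length_take, List.length_cons]; omega
  · simp only [List.length_drop, List.length_cons]; omega

def ase_ary_alt (l : List Int) : Int :=
  if l.isEmpty then 0 else goAse l 0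

-- ===== PRECONDITION & SPEC =====
def Spec_ase_ary (l : List Int) (out : Int) : Prop := out = ase_ary_alt l
instance (l : List Int) (out : Int) : Decidable (Spec_ase_ary l out) := by unfold Spec_ase_ary; infer_instance

-- ===== CLAIM (what is proved, stated in full; the proofs are below) =====
def Claim_equal_ase_ary : Prop := ∀ (l : List Int), Dom_ase_ary l → Spec_ase_ary l (ase_ary l)

-- ===== LEMMAS AND PROOFS =====
lemma max_foldl_comm (t : List Int) : ∀ (a b : Int), max b (t.foldl max a) = t.foldl max (max b a) := by
  induction t with
  | nil => intro a b; rfl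
  | cons c cs ih =>
    intro a b
    simp only [List.foldl_cons, ih, max_assoc]

lemma foldl_max_getD (u : List Int) (hu : u ≠ []) (b : Int) :
    max b ((PySem.List.max? u (fun z => z)).getD 0) = u.foldl max b := by
  rcases u with _ | ⟨x, t⟩
  · exact absurd rfl hu
  · rw [PySem.List.max?_id_cons]
    simp only [Option.getD_some, List.foldl_cons]
    exact max_foldl_comm t x b

lemma fold_fst (seg : List Int) : ∀ (s f : Int),
    (seg.foldl (fun (p : Int × Int) i => if i > p.1 then (i, p.2) else (p.1, p.2 + 1)) (s, f)).1
      = seg.foldl max s := by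
  induction seg with
  | nil => intro s f; rfl
  | cons x xs ih =>
    intro s f
    simp only [List.foldl_cons]
    by_cases h : x > s
    · rw [if_pos h]; rw [ih]; congr 1; omega
    · rw [if_neg h]; rw [ih]; congr 1; omega

lemma fold_snd_shift (seg : List Int) : ∀ (s f : Int),
    (seg.foldl (fun (p : Int × Int) i => if i > p.1 then (i, p.2) else (p.1, p.2 + 1)) (s, f)).2
      = f + (seg.foldl (fun (p : Int × Int) i => if i > p.1 then (i, p.2) else (p.1, p.2 + 1)) (s, 0)).2 := by
  induction seg with
  | nil => intro s f; simp
  | cons x xs ih =>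
    intro s f
    simp only [List.foldl_cons]
    by_cases h : x > s
    · rw [if_pos h, if_pos h, ih x f]
    · rw [if_neg h, if_neg h, ih s (f + 1), ih s (0 + 1)]
      ring

lemma go_eq (n : Nat) : ∀ (seg : List Int), seg.length = n → seg ≠ [] → ∀ (bound : Int),
    goAse seg bound
      = (seg.foldl (fun (p : Int × Int) i => if i > p.1 then (i, p.2) else (p.1, p.2 + 1)) (bound, 0)).2 := by
  induction n using Nat.strong_induction_on with
  | _ n ih =>
    intro seg hlen hne bound
    match seg with
    | [] => exact absurd rfl hne
    | [x] =>
      rw [goAse]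
      simp only [List.foldl_cons, List.foldl_nil]
      by_cases h : x > bound
      · rw [if_pos h, if_pos h]
      · rw [if_neg h, if_neg h]
        norm_num
    | x :: y :: rest =>
      rw [goAse]
      have hn : rest.length + 1 + 1 = n := by simpa using hlen
      have htake_ne : (x :: y :: rest).take ((x :: y :: rest).length / 2) ≠ [] := by
        intro hc
        have := congrArg List.length hc
        simp only [List.length_take, List.length_cons, List.length_nil] at this
        omega
      have hdrop_ne : (x :: y :: rest).drop ((x :: y :: rest).length / 2) ≠ [] := by
        intro hc
        have := congrArg List.length hc
        simp only [List.length_drop, List.length_cons, List.length_nil] at this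
        omega
      have htlen : ((x :: y :: rest).take ((x :: y :: rest).length / 2)).length < n := by
        simp only [List.length_take, List.length_cons]
        omega
      have hdlen : ((x :: y :: rest).drop ((x :: y :: rest).length / 2)).length < n := by
        simp only [List.length_drop, List.length_cons]
        omega
      rw [ih _ htlen _ rfl htake_ne bound,
        ih _ hdlen _ rfl hdrop_ne _]
      conv_rhs =>
        rw [← List.take_append_drop ((x :: y :: rest).length / 2) (x :: y :: rest),
          List.foldl_append]
      have hP := fold_snd_shift ((x :: y :: rest).drop ((x :: y :: rest).length / 2))
        ((((x :: y :: rest).take ((x :: y :: rest).length / 2)).foldl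
          (fun (p : Int × Int) i => if i > p.1 then (i, p.2) else (p.1, p.2 + 1)) (bound, 0)).1)
        ((((x :: y :: rest).take ((x :: y :: rest).length / 2)).foldl
          (fun (p : Int × Int) i => if i > p.1 then (i, p.2) else (p.1, p.2 + 1)) (bound, 0)).2)
      rw [Prod.mk.eta] at hP
      rw [hP]
      have hfst := fold_fst ((x :: y :: rest).take ((x :: y :: rest).length / 2)) bound 0
      have hbound := foldl_max_getD ((x :: y :: rest).take ((x :: y :: rest).length / 2)) htake_ne bound
      rw [hbound, ← hfst]

-- ===== VERDICT (by name: the statement is the Claim_ definition above) =====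
theorem ase_ary_spec : Claim_equal_ase_ary := by
  intro l _
  unfold Spec_ase_ary ase_ary ase_ary_alt
  rcases l with _ | ⟨x, xs⟩
  · rfl
  · rw [if_neg (by simp), go_eq (x :: xs).length _ rfl (by simp) 0]
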